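-- pv_equiv track=rewrite | github.com/jv92admin/fpltools | src/alfred_fpl/domain/__init__.py | compute_entity_label
-- ===== SOURCE A (Python) =====
-- def compute_entity_label(
--     record: dict, entity_type: str, ref: str
-- ) -> str:
--     """CONTRACT: never return empty string — return ref as fallback."""
--     if entity_type == "player" and record.get("web_name"):
--         return record["web_name"]
--     if entity_type == "team" and record.get("short_name"):
--         return record["short_name"]
--     if entity_type == "position" and record.get("short_name"):
--         return record["short_name"]
--     if entity_type == "gw" and record.get("name"):
--         return record["name"]
--     if entity_type == "mgr" and record.get("label"):
--         return record["label"]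
--     if entity_type == "league" and record.get("name"):
--         return record["name"]
--     if entity_type == "standing" and record.get("manager_name"):
--         team = record.get("team_name", "")
--         return f"{record['manager_name']} ({team})" if team else record["manager_name"]
--     if entity_type == "mszn" and record.get("manager_name"):
--         return record["manager_name"]
--     for field in ("web_name", "short_name", "name", "label", "manager_name"):
--         if record.get(field):
--             return record[field]
--     return ref
-- ===== SOURCE B (Python) =====
-- # B: one priority list of candidate fields (type-preferred field prepended to the
-- # generic order), consumed by a single recursive first-truthy scan; 'standing'
-- # keeps its explicit formatting branch. Objective: alternative decomposition.
--
-- _PREFERRED = {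
--     "player": "web_name",
--     "team": "short_name",
--     "position": "short_name",
--     "gw": "name",
--     "mgr": "label",
--     "league": "name",
--     "mszn": "manager_name",
-- }
--
--
-- def _first_label(record, fields, ref):
--     if not fields:
--         return ref
--     v = record.get(fields[0])
--     return v if v else _first_label(record, fields[1:], ref)
--
--
-- def compute_entity_label(record: dict, entity_type: str, ref: str) -> str:
--     if entity_type == "standing" and record.get("manager_name"):
--         team = record.get("team_name", "")
--         return f"{record['manager_name']} ({team})" if team else record["manager_name"]
--     pref = _PREFERRED.get(entity_type)
--     candidates = ([pref] if pref else []) + [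
--         "web_name", "short_name", "name", "label", "manager_name"
--     ]
--     return _first_label(record, candidates, ref)
-- ===== Notes on version B (the rewrite author's own statement) =====
-- stated objective: alternative
-- what changed: A's eight-branch if-chain followed by a separate fallback loop is replaced by building one priority list of candidate fields (type-preferred field prepended to the generic order) consumed in a single recursive first-truthy scan; only the 'standing' formatting stays a branch.
import Mathlib
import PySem

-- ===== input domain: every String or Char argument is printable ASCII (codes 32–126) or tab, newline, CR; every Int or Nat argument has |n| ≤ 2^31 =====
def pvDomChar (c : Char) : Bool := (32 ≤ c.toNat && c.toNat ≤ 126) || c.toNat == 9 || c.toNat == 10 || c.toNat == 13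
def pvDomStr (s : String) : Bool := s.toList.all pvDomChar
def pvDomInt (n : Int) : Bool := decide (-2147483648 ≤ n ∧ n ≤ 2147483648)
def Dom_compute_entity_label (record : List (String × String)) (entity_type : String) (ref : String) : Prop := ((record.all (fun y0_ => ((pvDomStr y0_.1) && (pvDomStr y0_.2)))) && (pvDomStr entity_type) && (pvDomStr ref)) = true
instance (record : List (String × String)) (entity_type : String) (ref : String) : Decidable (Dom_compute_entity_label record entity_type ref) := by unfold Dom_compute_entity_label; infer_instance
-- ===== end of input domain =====

set_option maxRecDepth 4000


-- B builds one priority list of candidate fields consumed by a single recursive scan; return value only.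
-- ===== PORT A =====
-- record.get(k): first match in the association list, none if absent (exact for a Python dict)
def pvGet (record : List (String × String)) (k : String) : Option String :=
  (record.find? (fun p => p.1 == k)).map (fun p => p.2)

-- record.get(k, ""): truthy check 'record.get(k)' on str values = result nonempty
def pvGetD (record : List (String × String)) (k : String) : String :=
  (pvGet record k).getD ""

-- 'for field in (...): if record.get(field): return record[field]' then 'return ref'
def pvLoopA (record : List (String × String)) (ref : String) : List String → String
  | [] => ref
  | f :: rest => if pvGetD record f ≠ "" then pvGetD record f else pvLoopA record ref rest

def compute_entity_label (record : List (String × String)) (entity_type : String) (ref : String) : String :=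
  if entity_type = "player" ∧ pvGetD record "web_name" ≠ "" then pvGetD record "web_name"
  else if entity_type = "team" ∧ pvGetD record "short_name" ≠ "" then pvGetD record "short_name"
  else if entity_type = "position" ∧ pvGetD record "short_name" ≠ "" then pvGetD record "short_name"
  else if entity_type = "gw" ∧ pvGetD record "name" ≠ "" then pvGetD record "name"
  else if entity_type = "mgr" ∧ pvGetD record "label" ≠ "" then pvGetD record "label"
  else if entity_type = "league" ∧ pvGetD record "name" ≠ "" then pvGetD record "name"
  else if entity_type = "standing" ∧ pvGetD record "manager_name" ≠ "" then
    let team := pvGetD record "team_name"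
    if team ≠ "" then pvGetD record "manager_name" ++ " (" ++ team ++ ")"
    else pvGetD record "manager_name"
  else if entity_type = "mszn" ∧ pvGetD record "manager_name" ≠ "" then pvGetD record "manager_name"
  else pvLoopA record ref ["web_name", "short_name", "name", "label", "manager_name"]

-- ===== PORT B =====
def pvPreferred : PySem.Dict String String :=
  PySem.Dict.ofList [("player", "web_name"), ("team", "short_name"), ("position", "short_name"),
    ("gw", "name"), ("mgr", "label"), ("league", "name"), ("mszn", "manager_name")]

-- '_first_label': recursive first-truthy scan over the candidate fields
def pvFirstLabel (record : List (String × String)) (ref : String) : List String → String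
  | [] => ref
  | f :: rest =>
      let v := pvGetD record f
      if v ≠ "" then v else pvFirstLabel record ref rest

def compute_entity_label_alt (record : List (String × String)) (entity_type : String) (ref : String) : String :=
  if entity_type = "standing" ∧ pvGetD record "manager_name" ≠ "" then
    let team := pvGetD record "team_name"
    if team ≠ "" then pvGetD record "manager_name" ++ " (" ++ team ++ ")"
    else pvGetD record "manager_name"
  else
    let pref := PySem.Dict.get? pvPreferred entity_type
    let candidates := (match pref with | some f => [f] | none => []) ++
      ["web_name", "short_name", "name", "label", "manager_name"]
    pvFirstLabel record ref candidates

-- ===== PRECONDITION & SPEC =====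
def Spec_compute_entity_label (record : List (String × String)) (entity_type : String) (ref : String) (out : String) : Prop := out = compute_entity_label_alt record entity_type ref
instance (record : List (String × String)) (entity_type : String) (ref : String) (out : String) : Decidable (Spec_compute_entity_label record entity_type ref out) := by unfold Spec_compute_entity_label; infer_instance

-- ===== CLAIM (what is proved, stated in full; the proofs are below) =====
def Claim_equal_compute_entity_label : Prop := ∀ (record : List (String × String)) (entity_type : String) (ref : String), Dom_compute_entity_label record entity_type ref → Spec_compute_entity_label record entity_type ref (compute_entity_label record entity_type ref)

-- ===== LEMMAS AND PROOFS =====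
set_option maxHeartbeats 1000000 in
theorem preferred_get (et : String) : PySem.Dict.get? pvPreferred et =
    if et = "player" then some "web_name" else if et = "team" then some "short_name"
    else if et = "position" then some "short_name" else if et = "gw" then some "name"
    else if et = "mgr" then some "label" else if et = "league" then some "name"
    else if et = "mszn" then some "manager_name" else none := by
  have h : pvPreferred = PySem.Dict.mk [("player", "web_name"), ("team", "short_name"),
      ("position", "short_name"), ("gw", "name"), ("mgr", "label"), ("league", "name"),
      ("mszn", "manager_name")] := by rfl
  simp only [h, PySem.Dict.get?_mk_cons, beq_iff_eq]
  split_ifs <;> first | rfl | (subst_vars; simp_all) | simp_all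

-- A's fallback loop computes the same scan as B's recursive helper
theorem loopA_eq_firstLabel (record : List (String × String)) (ref : String) (fs : List String) :
    pvLoopA record ref fs = pvFirstLabel record ref fs := by
  induction fs with
  | nil => rfl
  | cons f rest ih => by_cases h : pvGetD record f ≠ "" <;> simp [pvLoopA, pvFirstLabel, h, ih]

-- ===== VERDICT (by name: the statement is the Claim_ definition above) =====
theorem compute_entity_label_spec : Claim_equal_compute_entity_label := by
  intro record entity_type ref _
  unfold Spec_compute_entity_label compute_entity_label compute_entity_label_alt
  by_cases h1 : entity_type = "player" <;>
  by_cases h2 : entity_type = "team" <;>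
  by_cases h3 : entity_type = "position" <;>
  by_cases h4 : entity_type = "gw" <;>
  by_cases h5 : entity_type = "mgr" <;>
  by_cases h6 : entity_type = "league" <;>
  by_cases h7 : entity_type = "standing" <;>
  by_cases h8 : entity_type = "mszn" <;>
    simp_all [preferred_get, loopA_eq_firstLabel, pvFirstLabel]
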